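-- pv_equiv track=rewrite | github.com/pstpn/Python-programming-1-course | lab_01/secure.py | secure_five
-- ===== SOURCE A (Python) =====
-- def secure_five(b: str):
--     try:
--         float(b)
--     except ValueError:
--         return False
--     if b[0] == '-':
--         b = b[1:]
--     for i in b:
--         if i not in ['0', '1', '2', '3', '4', '.']:
--             return False
--     return True
-- ===== SOURCE B (Python) =====
-- def secure_five(b: str):
--     s = b[1:] if b.startswith('-') else b
--     head, _sep, tail = s.partition('.')
--     if '.' in tail:
--         return False
--     if not head and not tail:
--         return False
--     return all(c in '01234' for c in head + tail)
-- ===== Notes on version B (the rewrite author's own statement) =====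
-- stated objective: simpler
-- what changed: A probes float(b) with try/except and then scans every character against a whitelist; B drops the float parser entirely and checks the accepted grammar directly in one pass: strip an optional leading minus sign, partition at the first dot, require no second dot and at least one digit, and require every digit to be between 0 and 4.
import Mathlib
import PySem

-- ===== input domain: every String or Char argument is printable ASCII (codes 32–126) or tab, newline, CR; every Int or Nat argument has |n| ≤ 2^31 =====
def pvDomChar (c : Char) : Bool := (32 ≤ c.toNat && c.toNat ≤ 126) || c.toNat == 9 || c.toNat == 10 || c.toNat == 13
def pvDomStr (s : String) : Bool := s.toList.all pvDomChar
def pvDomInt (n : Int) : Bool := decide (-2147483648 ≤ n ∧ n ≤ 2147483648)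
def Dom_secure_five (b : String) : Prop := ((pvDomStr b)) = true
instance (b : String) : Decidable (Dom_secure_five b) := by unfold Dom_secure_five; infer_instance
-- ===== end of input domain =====

-- B replaces A's try/float probe + per-character whitelist loop by one direct grammar
-- check (strip sign, partition at the first dot, validate both digit groups); objective: simpler.

-- ===== PORT A =====
-- A-side helpers: a hand port of CPython's `float(str)` ACCEPTANCE (does `float(b)` raise
-- ValueError or not); exact on all strings over the characters admitted by Dom_secure_five
-- (grammar: optional whitespace, optional sign, inf/infinity/nan case-insensitive or a
-- decimal number with optional fraction/exponent and underscores only between digits).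

def pvIsWs (c : Char) : Bool := c == ' ' || c == '\t' || c == '\n' || c == '\x0d' || c == '\x0b' || c == '\x0c'

-- leading/trailing whitespace stripped, as float() does
def pvStripWs (l : List Char) : List Char :=
  ((l.dropWhile pvIsWs).reverse.dropWhile pvIsWs).reverse

-- a digit run already begun: more digits, or '_' followed by a digit (underscores only between digits)
def pvEatRest : List Char → List Char
  | [] => []
  | c :: r =>
    if c.isDigit then pvEatRest r
    else if c == '_' && (r.headD ' ').isDigit then pvEatRest r.tail  -- '_' between two digits
    else c :: r
termination_by l => l.length
decreasing_by
  all_goals simp only [List.length_cons, List.length_tail]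
  all_goals omega

-- digitpart: at least one digit; returns the rest, none if no leading digit
def pvEatDigits : List Char → Option (List Char)
  | [] => none
  | c :: r => if c.isDigit then some (pvEatRest r) else none

-- optional exponent then end of string
def pvParseExp : List Char → Bool
  | [] => true
  | c :: r =>
    if c == 'e' || c == 'E' then
      let r2 := if (r.headD ' ') == '+' || (r.headD ' ') == '-' then r.tail else r
      match pvEatDigits r2 with
      | some rem => rem.isEmpty
      | none => false
    else false

-- digitpart ['.' [digitpart]] | '.' digitpart, then optional exponent
def pvParseNum (l : List Char) : Bool :=
  match pvEatDigits l with
  | some r =>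
    match r with
    | x :: r2 => if x == '.' then pvParseExp ((pvEatDigits r2).getD r2) else pvParseExp r
    | [] => pvParseExp []
  | none =>
    match l with
    | x :: r2 =>
      if x == '.' then
        match pvEatDigits r2 with
        | some r3 => pvParseExp r3
        | none => false
      else false
    | [] => false

def pvLowerChar (c : Char) : Char :=
  if 'A' ≤ c && c ≤ 'Z' then Char.ofNat (c.toNat + 32) else c

def pvInfNan (l : List Char) : Bool :=
  let low := l.map pvLowerChar
  low = ['i','n','f'] || low = ['i','n','f','i','n','i','t','y'] || low = ['n','a','n']

-- after whitespace and sign: inf/nan or a number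
def pvFloatCore (l : List Char) : Bool := pvInfNan l || pvParseNum l

def pvFloatOk (l : List Char) : Bool :=
  let s := pvStripWs l
  let s2 := match s with
    | '+' :: r => r
    | '-' :: r => r
    | _ => s
  pvFloatCore s2

-- the per-character loop of A (early-return False ≙ List.all)
def pvCheckAllowed (l : List Char) : Bool :=
  l.all (fun c => ['0', '1', '2', '3', '4', '.'].contains c)

def pvListA (l : List Char) : Bool :=
  if pvFloatOk l then
    -- b[0] == '-' then b = b[1:]; float('') raises, so l ≠ [] whenever this runs
    let l2 := if l.headD ' ' == '-' then l.tail else l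
    pvCheckAllowed l2
  else false

def secure_five (b : String) : Bool := pvListA b.toList

-- ===== PORT B =====
def pvListB (l : List Char) : Bool :=
  -- s = b[1:] if b.startswith('-') else b
  let s := if l.headD ' ' == '-' then l.tail else l
  -- head, _sep, tail = s.partition('.')
  let head := s.takeWhile (fun c => !(c == '.'))
  let rest := s.dropWhile (fun c => !(c == '.'))
  let tail := rest.drop 1
  if tail.contains '.' then false
  else if head.isEmpty && tail.isEmpty then false
  else (head ++ tail).all (fun c => ['0', '1', '2', '3', '4'].contains c)

def secure_five_alt (b : String) : Bool := pvListB b.toList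

-- ===== PRECONDITION & SPEC =====
def Spec_secure_five (b : String) (out : Bool) : Prop := out = secure_five_alt b
instance (b : String) (out : Bool) : Decidable (Spec_secure_five b out) := by unfold Spec_secure_five; infer_instance

-- ===== CLAIM (what is proved, stated in full; the proofs are below) =====
def Claim_equal_secure_five : Prop := ∀ (b : String), Dom_secure_five b → Spec_secure_five b (secure_five b)

-- ===== LEMMAS AND PROOFS =====

def pvAllowed (c : Char) : Bool := ['0', '1', '2', '3', '4', '.'].contains c

theorem pvAllowed_cases {c : Char} (h : pvAllowed c = true) :
    c = '0' ∨ c = '1' ∨ c = '2' ∨ c = '3' ∨ c = '4' ∨ c = '.' := by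
  simpa [pvAllowed] using h

theorem pvAllowed_digit {c : Char} (h : pvAllowed c = true) :
    c.isDigit = !(c == '.') := by
  rcases pvAllowed_cases h with h | h | h | h | h | h <;> subst h <;> decide

theorem pvAllowed_notWs {c : Char} (h : pvAllowed c = true) : pvIsWs c = false := by
  rcases pvAllowed_cases h with h | h | h | h | h | h <;> subst h <;> decide

theorem pvAllowed_in01234 {c : Char} (h : pvAllowed c = true) :
    (['0', '1', '2', '3', '4'].contains c) = c.isDigit := by
  rcases pvAllowed_cases h with h | h | h | h | h | h <;> subst h <;> decide

theorem pvEatRest_allowed (l : List Char) (h : ∀ c ∈ l, pvAllowed c = true) :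
    pvEatRest l = l.dropWhile Char.isDigit := by
  induction l with
  | nil => simp [pvEatRest]
  | cons c r ih =>
    have hc := h c (List.mem_cons_self ..)
    have ih' := ih (fun x hx => h x (List.mem_cons_of_mem _ hx))
    by_cases hd : c.isDigit
    · rw [pvEatRest, List.dropWhile_cons, if_pos hd, if_pos hd, ih']
    · have hu : (c == '_') = false := by
        rcases pvAllowed_cases hc with h | h | h | h | h | h <;> subst h <;> rfl
      rw [pvEatRest, List.dropWhile_cons, if_neg hd, if_neg (by simp [hu]),
        if_neg (by simpa using hd)]

theorem pvTakeWhile_allowed (l : List Char) (h : ∀ c ∈ l, pvAllowed c = true) :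
    l.takeWhile (fun c => !(c == '.')) = l.takeWhile Char.isDigit := by
  induction l with
  | nil => rfl
  | cons c r ih =>
    have hc := pvAllowed_digit (h c (List.mem_cons_self ..))
    have ih' := ih (fun x hx => h x (List.mem_cons_of_mem _ hx))
    simp only [List.takeWhile_cons, ← hc]
    split <;> simp_all

theorem pvDropWhile_allowed (l : List Char) (h : ∀ c ∈ l, pvAllowed c = true) :
    l.dropWhile (fun c => !(c == '.')) = l.dropWhile Char.isDigit := by
  induction l with
  | nil => rfl
  | cons c r ih =>
    have hc := pvAllowed_digit (h c (List.mem_cons_self ..))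
    have ih' := ih (fun x hx => h x (List.mem_cons_of_mem _ hx))
    simp only [List.dropWhile_cons, ← hc]
    split <;> simp_all

-- after eating the digit prefix of an allowed string, the rest parses as exponent iff empty
theorem pvParseExp_drop (l : List Char) (h : ∀ c ∈ l, pvAllowed c = true) :
    pvParseExp (l.dropWhile Char.isDigit) = (l.dropWhile Char.isDigit).isEmpty := by
  induction l with
  | nil => rfl
  | cons c r ih =>
    by_cases hd : c.isDigit
    · rw [List.dropWhile_cons, if_pos hd, ih (fun x hx => h x (List.mem_cons_of_mem _ hx))]
    · have hc : c = '.' := by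
        rcases pvAllowed_cases (h c (List.mem_cons_self ..)) with h1 | h1 | h1 | h1 | h1 | h1 <;>
          first | (exact h1) | (exfalso; apply hd; subst h1; decide)
      subst hc
      rw [List.dropWhile_cons, if_neg (by decide)]
      rfl

theorem pvAll_digit (l : List Char) (h : ∀ c ∈ l, pvAllowed c = true) :
    (l.all (fun c => ['0', '1', '2', '3', '4'].contains c)) = l.all Char.isDigit := by
  induction l with
  | nil => rfl
  | cons c r ih =>
    rw [List.all_cons, List.all_cons, pvAllowed_in01234 (h c (List.mem_cons_self ..)),
      ih (fun x hx => h x (List.mem_cons_of_mem _ hx))]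

theorem pvContains_dot (l : List Char) (h : ∀ c ∈ l, pvAllowed c = true) :
    (l.contains '.') = !(l.all Char.isDigit) := by
  induction l with
  | nil => rfl
  | cons c r ih =>
    have hc := pvAllowed_digit (h c (List.mem_cons_self ..))
    have ih' := ih (fun x hx => h x (List.mem_cons_of_mem _ hx))
    rw [List.contains_cons, List.all_cons, ih', hc]
    cases hb : ('.' == c) <;> cases hb2 : (c == '.') <;>
      simp_all [BEq.comm (a := '.') (b := c)]

theorem pvDropWhile_digit_empty (l : List Char) :
    ((l.dropWhile Char.isDigit).isEmpty) = l.all Char.isDigit := by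
  induction l with
  | nil => rfl
  | cons c r ih =>
    by_cases hd : c.isDigit <;> simp [hd, ih]

theorem pvInfNan_allowed (l : List Char) (h : ∀ c ∈ l, pvAllowed c = true) :
    pvInfNan l = false := by
  cases l with
  | nil => rfl
  | cons c r =>
    rcases pvAllowed_cases (h c (List.mem_cons_self ..)) with hc | hc | hc | hc | hc | hc <;>
      subst hc <;> simp [pvInfNan, pvLowerChar]

def pvBExpr2 (head tail : List Char) : Bool :=
  if tail.contains '.' then false
  else if head.isEmpty && tail.isEmpty then false
  else (head ++ tail).all (fun c => ['0', '1', '2', '3', '4'].contains c)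

def pvBExpr (m : List Char) : Bool :=
  pvBExpr2 (m.takeWhile (fun c => !(c == '.'))) ((m.dropWhile (fun c => !(c == '.'))).drop 1)

-- an all-digit nonempty head (plus all-digit tail) of allowed characters passes B's final check
theorem pvBExpr2_digits (head tail : List Char) (hh : ∀ c ∈ head, pvAllowed c = true)
    (ht : ∀ c ∈ tail, pvAllowed c = true) (h1 : head.all Char.isDigit = true)
    (h2 : tail.all Char.isDigit = true) (hne : head ≠ [] ∨ tail ≠ []) :
    pvBExpr2 head tail = true := by
  unfold pvBExpr2
  rw [if_neg, if_neg]
  · rw [List.all_append, pvAll_digit _ hh, pvAll_digit _ ht, h1, h2]; rfl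
  · rcases hne with hne | hne <;> cases head <;> cases tail <;> simp_all
  · rw [pvContains_dot tail ht, h2]; simp

-- core of the equivalence: on allowed strings, float acceptance coincides with B's grammar check
theorem pvCore_eq (m : List Char) (h : ∀ c ∈ m, pvAllowed c = true) :
    pvFloatCore m = pvBExpr m := by
  unfold pvFloatCore pvBExpr
  rw [pvInfNan_allowed m h, Bool.false_or, pvTakeWhile_allowed m h, pvDropWhile_allowed m h]
  cases m with
  | nil => rfl
  | cons c r =>
    have hr : ∀ x ∈ r, pvAllowed x = true := fun x hx => h x (List.mem_cons_of_mem _ hx)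
    have hhead : ∀ y ∈ c :: r.takeWhile Char.isDigit, pvAllowed y = true := by
      intro y hy
      rcases List.mem_cons.mp hy with hy | hy
      · exact hy ▸ h c (List.mem_cons_self ..)
      · exact hr y (List.Sublist.mem hy (List.takeWhile_sublist _))
    by_cases hd : c.isDigit
    · -- integer part present
      unfold pvParseNum
      rw [show pvEatDigits (c :: r) = some (pvEatRest r) from by rw [pvEatDigits, if_pos hd],
        pvEatRest_allowed r hr, List.takeWhile_cons, List.dropWhile_cons, if_pos hd, if_pos hd]
      have hheadall : (c :: r.takeWhile Char.isDigit).all Char.isDigit = true := by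
        rw [List.all_cons, hd, List.all_takeWhile]; rfl
      have hheadne : (c :: r.takeWhile Char.isDigit) ≠ [] := by simp
      cases hrest : r.dropWhile Char.isDigit with
      | nil =>
        dsimp only
        rw [List.drop_nil, show pvParseExp [] = true from rfl]
        exact (pvBExpr2_digits _ _ hhead (fun y hy => absurd hy (List.not_mem_nil))
          hheadall rfl (Or.inl hheadne)).symm
      | cons x t =>
        have hx0 : x.isDigit = false := by
          have := List.head_dropWhile_not Char.isDigit (l := r) (by simp [hrest])
          simp only [hrest, List.head_cons] at this
          exact this
        have hxa : pvAllowed x = true :=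
          hr x (List.Sublist.mem (hrest ▸ List.mem_cons_self ..) (List.dropWhile_sublist _))
        have hxdot : x = '.' := by
          rcases pvAllowed_cases hxa with h1 | h1 | h1 | h1 | h1 | h1 <;>
            first | (exact h1) | (exfalso; revert hx0; subst h1; decide)
        subst hxdot
        have ht : ∀ y ∈ t, pvAllowed y = true := by
          intro y hy
          have hmem : y ∈ r.dropWhile Char.isDigit := by
            rw [hrest]; exact List.mem_cons_of_mem _ hy
          exact hr y (List.Sublist.mem hmem (List.dropWhile_sublist _))
        dsimp only
        rw [if_pos (show (('.' : Char) == '.') = true from rfl), List.drop_one, List.tail_cons]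
        cases t with
        | nil =>
          rw [show pvEatDigits [] = none from rfl]
          dsimp only [Option.getD_none]
          rw [show pvParseExp [] = true from rfl]
          exact (pvBExpr2_digits _ _ hhead (fun y hy => absurd hy (List.not_mem_nil))
            hheadall rfl (Or.inl hheadne)).symm
        | cons d t2 =>
          have ht2 : ∀ y ∈ t2, pvAllowed y = true := fun y hy => ht y (List.mem_cons_of_mem _ hy)
          by_cases hdd : d.isDigit
          · rw [show pvEatDigits (d :: t2) = some (pvEatRest t2) from by
                rw [pvEatDigits, if_pos hdd],
              pvEatRest_allowed t2 ht2, Option.getD_some, pvParseExp_drop t2 ht2,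
              pvDropWhile_digit_empty]
            cases hall : t2.all Char.isDigit
            · rw [pvBExpr2, if_pos, Bool.false_eq]
              rw [pvContains_dot _ ht, List.all_cons, hdd, hall]; rfl
            · exact (pvBExpr2_digits _ _ hhead ht hheadall
                (by rw [List.all_cons, hdd, hall]; rfl) (Or.inl hheadne)).symm
          · have hddot : d = '.' := by
              rcases pvAllowed_cases (ht d (List.mem_cons_self ..)) with h1 | h1 | h1 | h1 | h1 | h1 <;>
                first | (exact h1) | (exfalso; apply hdd; subst h1; decide)
            subst hddot
            rw [show pvEatDigits ('.' :: t2) = none from by rw [pvEatDigits]; rfl]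
            dsimp only [Option.getD_none]
            rw [show pvParseExp ('.' :: t2) = false from by rw [pvParseExp]; rfl]
            rw [pvBExpr2, if_pos]
            rw [List.contains_cons]; simp
    · -- no integer part: the string must start with '.'
      have hcdot : c = '.' := by
        rcases pvAllowed_cases (h c (List.mem_cons_self ..)) with h1 | h1 | h1 | h1 | h1 | h1 <;>
          first | (exact h1) | (exfalso; apply hd; subst h1; decide)
      subst hcdot
      unfold pvParseNum
      rw [show pvEatDigits ('.' :: r) = none from by rw [pvEatDigits]; rfl,
        List.takeWhile_cons, List.dropWhile_cons]
      rw [if_neg (by decide), if_neg (by decide)]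
      dsimp only
      rw [if_pos (show (('.' : Char) == '.') = true from rfl), List.drop_one, List.tail_cons]
      cases r with
      | nil => rfl
      | cons d t =>
        have hr' : ∀ x ∈ d :: t, pvAllowed x = true := fun x hx =>
          h x (List.mem_cons_of_mem _ hx)
        have ht : ∀ y ∈ t, pvAllowed y = true := fun y hy => hr' y (List.mem_cons_of_mem _ hy)
        by_cases hdd : d.isDigit
        · rw [show pvEatDigits (d :: t) = some (pvEatRest t) from by rw [pvEatDigits, if_pos hdd],
            pvEatRest_allowed t ht]
          dsimp only
          rw [pvParseExp_drop t ht, pvDropWhile_digit_empty]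
          cases hall : t.all Char.isDigit
          · rw [pvBExpr2, if_pos, Bool.false_eq]
            rw [pvContains_dot _ hr', List.all_cons, hdd, hall]; rfl
          · exact (pvBExpr2_digits _ _ (fun y hy => absurd hy (List.not_mem_nil)) hr' rfl
              (by rw [List.all_cons, hdd, hall]; rfl) (Or.inr (by simp))).symm
        · have hddot : d = '.' := by
            rcases pvAllowed_cases (hr' d (List.mem_cons_self ..)) with h1 | h1 | h1 | h1 | h1 | h1 <;>
              first | (exact h1) | (exfalso; apply hdd; subst h1; decide)
          subst hddot
          rw [show pvEatDigits ('.' :: t) = none from by rw [pvEatDigits]; rfl]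
          dsimp only
          rw [pvBExpr2, if_pos]
          rw [List.contains_cons]; simp

theorem pvStripWs_id (l : List Char) (h : ∀ c ∈ l, pvIsWs c = false) :
    pvStripWs l = l := by
  have h1 : l.dropWhile pvIsWs = l := by
    cases l with
    | nil => rfl
    | cons c r => rw [List.dropWhile_cons, if_neg (by simp [h c (List.mem_cons_self ..)])]
  have h2 : l.reverse.dropWhile pvIsWs = l.reverse := by
    cases hl : l.reverse with
    | nil => rfl
    | cons c r =>
      have hc : c ∈ l := by
        have : c ∈ l.reverse := by rw [hl]; exact List.mem_cons_self ..
        simpa using this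
      rw [List.dropWhile_cons, if_neg (by simp [h c hc])]
  rw [pvStripWs, h1, h2, List.reverse_reverse]

theorem pvIn01234_allowed {c : Char} (h : (['0','1','2','3','4'].contains c) = true) :
    pvAllowed c = true := by
  unfold pvAllowed
  simp only [List.contains_cons, List.contains_nil, Bool.or_eq_true, beq_iff_eq] at h ⊢
  tauto

-- B accepts only strings made of the allowed characters
theorem pvBExpr_allowed (m : List Char) (hB : pvBExpr m = true) :
    ∀ c ∈ m, pvAllowed c = true := by
  unfold pvBExpr pvBExpr2 at hB
  split at hB
  · exact absurd hB (by simp)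
  · split at hB
    · exact absurd hB (by simp)
    · intro c hc
      rw [← List.takeWhile_append_dropWhile (p := fun c => !(c == '.')) (l := m)] at hc
      rcases List.mem_append.mp hc with hc | hc
      · exact pvIn01234_allowed
          (List.all_eq_true.mp hB c (List.mem_append.mpr (Or.inl hc)))
      · cases hrest : m.dropWhile (fun c => !(c == '.')) with
        | nil => rw [hrest] at hc; cases hc
        | cons x t =>
          have hx : x = '.' := by
            have := List.head_dropWhile_not (fun c => !(c == '.')) (l := m) (by simp [hrest])
            simp only [hrest, List.head_cons] at this
            simpa using this
          rw [hrest] at hc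
          rcases List.mem_cons.mp hc with hc | hc
          · subst hc; rw [hx]; rfl
          · refine pvIn01234_allowed (List.all_eq_true.mp hB c (List.mem_append.mpr (Or.inr ?_)))
            rw [hrest]; simpa using hc

theorem pvListB_eq (l : List Char) :
    pvListB l = pvBExpr (if l.headD ' ' == '-' then l.tail else l) := rfl

theorem pvFloatOk_allowed (l : List Char) (h : ∀ c ∈ l, pvAllowed c = true) :
    pvFloatOk l = pvFloatCore l := by
  unfold pvFloatOk
  rw [pvStripWs_id l (fun c hc => pvAllowed_notWs (h c hc))]
  cases l with
  | nil => rfl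
  | cons c r =>
    rcases pvAllowed_cases (h c (List.mem_cons_self ..)) with hc | hc | hc | hc | hc | hc <;>
      subst hc <;> rfl

theorem pvFloatOk_neg (r : List Char) (h : ∀ c ∈ r, pvAllowed c = true) :
    pvFloatOk ('-' :: r) = pvFloatCore r := by
  unfold pvFloatOk
  rw [pvStripWs_id ('-' :: r) ?_]
  · rfl
  · intro c hc
    rcases List.mem_cons.mp hc with hc | hc
    · subst hc; rfl
    · exact pvAllowed_notWs (h c hc)

theorem pvCheckAllowed_false (l : List Char) (h : ¬ ∀ c ∈ l, pvAllowed c = true) :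
    pvCheckAllowed l = false := by
  cases hx : pvCheckAllowed l
  · rfl
  · exact absurd (fun c hc => List.all_eq_true.mp hx c hc) h

theorem pvBExpr_false (l : List Char) (h : ¬ ∀ c ∈ l, pvAllowed c = true) :
    pvBExpr l = false := by
  cases hx : pvBExpr l
  · rfl
  · exact absurd (pvBExpr_allowed l hx) h

theorem pvCore_case (s : List Char) :
    (if pvFloatOk s then pvCheckAllowed s else false) = pvBExpr s := by
  by_cases hall : ∀ c ∈ s, pvAllowed c = true
  · rw [pvFloatOk_allowed s hall, pvCore_eq s hall,
      show pvCheckAllowed s = true from List.all_eq_true.mpr hall]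
    cases pvBExpr s <;> rfl
  · rw [pvCheckAllowed_false s hall, pvBExpr_false s hall]
    cases pvFloatOk s <;> rfl

theorem pvListA_eq_pvListB (l : List Char) : pvListA l = pvListB l := by
  rw [pvListB_eq]
  unfold pvListA
  cases hsign : (l.headD ' ' == '-') with
  | false =>
    simp only [Bool.false_eq_true, if_false]
    exact pvCore_case l
  | true =>
    simp only [if_true]
    cases l with
    | nil => exact absurd hsign (by decide)
    | cons c r =>
      have hc : c = '-' := by
        have : (c == '-') = true := by simpa using hsign
        exact eq_of_beq this
      subst hc
      simp only [List.tail_cons]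
      by_cases hall : ∀ x ∈ r, pvAllowed x = true
      · rw [pvFloatOk_neg r hall, pvCore_eq r hall,
          show pvCheckAllowed r = true from List.all_eq_true.mpr hall]
        cases pvBExpr r <;> rfl
      · rw [pvCheckAllowed_false r hall, pvBExpr_false r hall]
        cases pvFloatOk ('-' :: r) <;> rfl

-- ===== VERDICT (by name: the statement is the Claim_ definition above) =====
theorem secure_five_spec : Claim_equal_secure_five := by
  intro b _
  unfold Spec_secure_five secure_five secure_five_alt
  exact pvListA_eq_pvListB b.toList
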